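-- pv_equiv track=rewrite | github.com/JojoN0tFound/rubik | optimization.py | _removeThreeMovement
-- ===== SOURCE A (Python) =====
-- def _removeThreeMovement(tmp):
-- 	newLst = []
-- 	i = 0
-- 	restart = False
-- 	while i < len(tmp):
-- 		if(i + 3 <= len(tmp) and tmp[i] == tmp[i + 1] == tmp[i + 2]):
-- 			newLst.append(tmp[i] + "'")
-- 			i += 3
-- 			restart = True
-- 		else:
-- 			newLst.append(tmp[i])
-- 			i += 1
-- 	return _removeThreeMovement(newLst) if restart else newLst
-- ===== SOURCE B (Python) =====
-- def _removeThreeMovement(tmp):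
--     # Run-length pass: each maximal run of k equal moves yields k//3 primed
--     # moves then k%3 plain ones; repeat the pass until no run reaches 3.
--     cur = tmp
--     while True:
--         out = []
--         shrunk = False
--         i = 0
--         n = len(cur)
--         while i < n:
--             j = i
--             while j < n and cur[j] == cur[i]:
--                 j += 1
--             q, r = divmod(j - i, 3)
--             if q:
--                 shrunk = True
--             out.extend([cur[i] + "'"] * q)
--             out.extend([cur[i]] * r)
--             i = j
--         if not shrunk:
--             return out
--         cur = out
-- ===== Notes on version B (the rewrite author's own statement) =====
-- stated objective: alternative
-- what changed: Each pass is computed over maximal runs of equal moves (emit k//3 primed then k%3 plain per run, run-length style) with an iterative fixpoint driver, instead of A's element-by-element index scan with a restart flag and tail recursion; the hinted one-pass stack reduction is NOT exact (it reorders ['A','A','A',"A'","A'","A'"]), so passes are kept.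
import Mathlib
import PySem

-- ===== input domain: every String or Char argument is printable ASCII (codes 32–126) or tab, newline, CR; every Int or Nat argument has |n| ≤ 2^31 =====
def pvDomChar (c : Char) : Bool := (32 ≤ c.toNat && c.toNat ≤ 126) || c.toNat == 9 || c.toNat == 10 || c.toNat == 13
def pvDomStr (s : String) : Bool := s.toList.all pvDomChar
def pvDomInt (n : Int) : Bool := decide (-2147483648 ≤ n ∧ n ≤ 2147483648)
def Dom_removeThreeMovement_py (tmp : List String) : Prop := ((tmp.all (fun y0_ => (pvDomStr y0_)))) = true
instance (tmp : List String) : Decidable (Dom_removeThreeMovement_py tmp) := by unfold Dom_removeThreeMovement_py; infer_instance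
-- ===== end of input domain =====

-- B replaces A's element-by-element collapse pass by a run-length pass (each maximal
-- run of k equal moves yields k/3 primed then k%3 plain moves), iterated to fixpoint;
-- alternative structure, same asymptotic cost.


-- ===== PORT A =====
-- A's `while i < len(tmp)` loop with accumulator newLst and restart flag; the fuel
-- parameter (one unit per iteration, tmp.length units suffice since i grows each
-- iteration) only makes the recursion structural and is never exhausted.
-- Python indexings tmp[i], tmp[i+1], tmp[i+2] are always in range when evaluated
-- (guarded by i < len and the short-circuiting i + 3 <= len), so getD is exact.
def goA (tmp : List String) (fuel i : Nat) (newLst : List String) (restart : Bool) :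
    List String × Bool :=
  match fuel with
  | 0 => (newLst, restart)
  | f + 1 =>
    if i < tmp.length then
      if i + 3 ≤ tmp.length ∧ tmp.getD i "" = tmp.getD (i+1) "" ∧
          tmp.getD (i+1) "" = tmp.getD (i+2) "" then
        goA tmp f (i+3) (newLst ++ [tmp.getD i "" ++ "'"]) true
      else
        goA tmp f (i+1) (newLst ++ [tmp.getD i ""]) restart
    else (newLst, restart)

-- A's trailing `return _removeThreeMovement(newLst) if restart else newLst`
-- recursion; each restart shrinks the list, so tmp.length + 1 rounds of fuel suffice.
def driveA (fuel : Nat) (tmp : List String) : List String :=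
  match fuel with
  | 0 => tmp
  | f + 1 =>
    if (goA tmp tmp.length 0 [] false).2 = true then
      driveA f (goA tmp tmp.length 0 [] false).1
    else (goA tmp tmp.length 0 [] false).1

def removeThreeMovement_py (tmp : List String) : List String :=
  driveA (tmp.length + 1) tmp

-- ===== PORT B =====
-- B's inner `while j < n and cur[j] == cur[i]` scan to the end of the current run
-- (fuel = cur.length suffices: j grows each iteration)
def altRunEnd (cur : List String) (x : String) (fuel j : Nat) : Nat :=
  match fuel with
  | 0 => j
  | f + 1 => if j < cur.length ∧ cur.getD j "" = x then altRunEnd cur x f (j+1) else j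

-- B's run-length pass: consume one maximal run per step, emit k/3 primed + k%3 plain
def altPass (cur : List String) (fuel i : Nat) (out : List String) (shrunk : Bool) :
    List String × Bool :=
  match fuel with
  | 0 => (out, shrunk)
  | f + 1 =>
    if i < cur.length then
      altPass cur f (altRunEnd cur (cur.getD i "") cur.length i)
        (out ++ List.replicate ((altRunEnd cur (cur.getD i "") cur.length i - i) / 3) (cur.getD i "" ++ "'")
             ++ List.replicate ((altRunEnd cur (cur.getD i "") cur.length i - i) % 3) (cur.getD i ""))
        (shrunk || decide ((altRunEnd cur (cur.getD i "") cur.length i - i) / 3 ≠ 0))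
    else (out, shrunk)

-- B's `while True` driver: repeat the pass until no run reached length 3
def driveB (fuel : Nat) (tmp : List String) : List String :=
  match fuel with
  | 0 => tmp
  | f + 1 =>
    if (altPass tmp tmp.length 0 [] false).2 = true then
      driveB f (altPass tmp tmp.length 0 [] false).1
    else (altPass tmp tmp.length 0 [] false).1

def removeThreeMovement_py_alt (tmp : List String) : List String :=
  driveB (tmp.length + 1) tmp

-- ===== PRECONDITION & SPEC =====
def Spec_removeThreeMovement_py (tmp : List String) (out : List String) : Prop := out = removeThreeMovement_py_alt tmp
instance (tmp : List String) (out : List String) : Decidable (Spec_removeThreeMovement_py tmp out) := by unfold Spec_removeThreeMovement_py; infer_instance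

-- ===== CLAIM (what is proved, stated in full; the proofs are below) =====
def Claim_equal_removeThreeMovement_py : Prop := ∀ (tmp : List String), Dom_removeThreeMovement_py tmp → Spec_removeThreeMovement_py tmp (removeThreeMovement_py tmp)

-- ===== LEMMAS AND PROOFS =====

-- definitional unfolding lemmas for the fuelled loops
theorem goA_zero (tmp : List String) (i : Nat) (newLst : List String) (restart : Bool) :
    goA tmp 0 i newLst restart = (newLst, restart) := rfl

theorem goA_succ (tmp : List String) (f i : Nat) (newLst : List String) (restart : Bool) :
    goA tmp (f + 1) i newLst restart =
      if i < tmp.length then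
        if i + 3 ≤ tmp.length ∧ tmp.getD i "" = tmp.getD (i+1) "" ∧
            tmp.getD (i+1) "" = tmp.getD (i+2) "" then
          goA tmp f (i+3) (newLst ++ [tmp.getD i "" ++ "'"]) true
        else
          goA tmp f (i+1) (newLst ++ [tmp.getD i ""]) restart
      else (newLst, restart) := rfl

theorem altRunEnd_zero (cur : List String) (x : String) (j : Nat) :
    altRunEnd cur x 0 j = j := rfl

theorem altRunEnd_succ (cur : List String) (x : String) (f j : Nat) :
    altRunEnd cur x (f + 1) j =
      if j < cur.length ∧ cur.getD j "" = x then altRunEnd cur x f (j+1) else j := rfl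

theorem altPass_succ (cur : List String) (f i : Nat) (out : List String) (shrunk : Bool) :
    altPass cur (f + 1) i out shrunk =
      if i < cur.length then
        altPass cur f (altRunEnd cur (cur.getD i "") cur.length i)
          (out ++ List.replicate ((altRunEnd cur (cur.getD i "") cur.length i - i) / 3) (cur.getD i "" ++ "'")
               ++ List.replicate ((altRunEnd cur (cur.getD i "") cur.length i - i) % 3) (cur.getD i ""))
          (shrunk || decide ((altRunEnd cur (cur.getD i "") cur.length i - i) / 3 ≠ 0))
      else (out, shrunk) := rfl

theorem driveA_succ (f : Nat) (tmp : List String) :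
    driveA (f + 1) tmp =
      if (goA tmp tmp.length 0 [] false).2 = true then
        driveA f (goA tmp tmp.length 0 [] false).1
      else (goA tmp tmp.length 0 [] false).1 := rfl

theorem driveB_succ (f : Nat) (tmp : List String) :
    driveB (f + 1) tmp =
      if (altPass tmp tmp.length 0 [] false).2 = true then
        driveB f (altPass tmp tmp.length 0 [] false).1
      else (altPass tmp tmp.length 0 [] false).1 := rfl


theorem goA_exit (tmp : List String) (fuel i : Nat) (newLst : List String)
    (restart : Bool) (h : tmp.length ≤ i) :
    goA tmp fuel i newLst restart = (newLst, restart) := by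
  cases fuel with
  | zero => rfl
  | succ f => rw [goA_succ, if_neg (by omega)]

theorem altPass_exit (cur : List String) (fuel i : Nat) (out : List String)
    (shrunk : Bool) (h : cur.length ≤ i) :
    altPass cur fuel i out shrunk = (out, shrunk) := by
  cases fuel with
  | zero => rfl
  | succ f => rw [altPass_succ, if_neg (by omega)]

-- any fuel covering the remaining indices computes the loop's true result
theorem goA_fuel_succ (tmp : List String) : ∀ f i newLst restart,
    tmp.length ≤ i + f →
    goA tmp (f + 1) i newLst restart = goA tmp f i newLst restart := by
  intro f
  induction f with
  | zero =>
      intro i newLst restart h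
      rw [goA_succ, if_neg (by omega), goA_zero]
  | succ f ih =>
      intro i newLst restart h
      by_cases hi : i < tmp.length
      · rw [goA_succ, if_pos hi]
        conv_rhs => rw [goA_succ, if_pos hi]
        split
        · exact ih (i+3) _ _ (by omega)
        · exact ih (i+1) _ _ (by omega)
      · rw [goA_exit _ _ _ _ _ (by omega), goA_exit _ _ _ _ _ (by omega)]

theorem goA_fuel_eq (tmp : List String) : ∀ d f i newLst restart,
    tmp.length ≤ i + f →
    goA tmp (f + d) i newLst restart = goA tmp f i newLst restart := by
  intro d
  induction d with
  | zero => intro f i newLst restart _; rfl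
  | succ d ih =>
      intro f i newLst restart h
      have h1 : f + (d + 1) = (f + d) + 1 := by omega
      rw [h1, goA_fuel_succ tmp (f + d) i newLst restart (by omega), ih f i newLst restart h]

theorem goA_fuel_any (tmp : List String) (f1 f2 i : Nat) (newLst : List String)
    (restart : Bool) (h1 : tmp.length ≤ i + f1) (h2 : tmp.length ≤ i + f2) :
    goA tmp f1 i newLst restart = goA tmp f2 i newLst restart := by
  rcases Nat.le_total f1 f2 with h | h
  · have : f2 = f1 + (f2 - f1) := by omega
    rw [this, goA_fuel_eq tmp (f2 - f1) f1 i newLst restart h1]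
  · have : f1 = f2 + (f1 - f2) := by omega
    rw [this, goA_fuel_eq tmp (f1 - f2) f2 i newLst restart h2]

theorem goA_len (tmp : List String) : ∀ f i newLst restart,
    (goA tmp f i newLst restart).1.length ≤ newLst.length + (tmp.length - i) := by
  intro f
  induction f with
  | zero => intro i newLst restart; exact Nat.le_add_right _ _
  | succ f ih =>
      intro i newLst restart
      by_cases hi : i < tmp.length
      · rw [goA_succ, if_pos hi]
        split
        · have := ih (i+3) (newLst ++ [tmp.getD i "" ++ "'"]) true
          simp only [List.length_append, List.length_cons, List.length_nil] at this ⊢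
          omega
        · have := ih (i+1) (newLst ++ [tmp.getD i ""]) restart
          simp only [List.length_append, List.length_cons, List.length_nil] at this ⊢
          omega
      · rw [goA_exit _ _ _ _ _ (by omega)]
        exact Nat.le_add_right _ _

-- if the restart flag came out true although it went in false, a collapse happened,
-- so the pass output is at least 2 shorter than the remaining input
theorem goA_restart' (tmp : List String) : ∀ f i newLst restart,
    (goA tmp f i newLst restart).2 = true →
    restart = true ∨
      (goA tmp f i newLst restart).1.length + 2 ≤ newLst.length + (tmp.length - i) := by
  intro f
  induction f with
  | zero => intro i newLst restart h2; exact Or.inl h2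
  | succ f ih =>
      intro i newLst restart h2
      by_cases hi : i < tmp.length
      · rw [goA_succ, if_pos hi] at h2 ⊢
        by_cases hc : i + 3 ≤ tmp.length ∧ tmp.getD i "" = tmp.getD (i+1) "" ∧
            tmp.getD (i+1) "" = tmp.getD (i+2) ""
        · right
          rw [if_pos hc] at h2 ⊢
          have := goA_len tmp f (i+3) (newLst ++ [tmp.getD i "" ++ "'"]) true
          simp only [List.length_append, List.length_cons, List.length_nil] at this ⊢
          omega
        · rw [if_neg hc] at h2 ⊢
          rcases ih (i+1) (newLst ++ [tmp.getD i ""]) restart h2 with h3 | h3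
          · exact Or.inl h3
          · right
            simp only [List.length_append, List.length_cons, List.length_nil] at h3 ⊢
            omega
      · rw [goA_exit _ _ _ _ _ (by omega)] at h2
        exact Or.inl h2

theorem goA_restart (tmp : List String)
    (h : (goA tmp tmp.length 0 [] false).2 = true) :
    (goA tmp tmp.length 0 [] false).1.length + 2 ≤ tmp.length := by
  rcases goA_restart' tmp tmp.length 0 [] false h with h3 | h3
  · exact absurd h3 (by simp)
  · simpa using h3

theorem altRunEnd_spec (cur : List String) (x : String) : ∀ fuel j,
    j ≤ cur.length → cur.length ≤ j + fuel →
    j ≤ altRunEnd cur x fuel j ∧ altRunEnd cur x fuel j ≤ cur.length ∧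
    (∀ m, j ≤ m → m < altRunEnd cur x fuel j → cur.getD m "" = x) ∧
    (altRunEnd cur x fuel j < cur.length → cur.getD (altRunEnd cur x fuel j) "" ≠ x) := by
  intro fuel
  induction fuel with
  | zero =>
      intro j hj hfj
      rw [altRunEnd_zero]
      refine ⟨Nat.le_refl _, hj, ?_, ?_⟩
      · intro m hm1 hm2; omega
      · intro hlt; omega
  | succ f ih =>
      intro j hj hfj
      by_cases h : j < cur.length ∧ cur.getD j "" = x
      · rw [altRunEnd_succ, if_pos h]
        obtain ⟨ih1, ih2, ih3, ih4⟩ := ih (j+1) (by omega) (by omega)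
        refine ⟨by omega, ih2, ?_, ih4⟩
        intro m hm1 hm2
        rcases Nat.eq_or_lt_of_le hm1 with rfl | hlt
        · exact h.2
        · exact ih3 m hlt hm2
      · rw [altRunEnd_succ, if_neg h]
        refine ⟨Nat.le_refl _, hj, ?_, ?_⟩
        · intro m hm1 hm2; omega
        · intro hlt hx; exact h ⟨hlt, hx⟩

theorem altRunEnd_gt (cur : List String) (i : Nat) (h : i < cur.length) :
    i < altRunEnd cur (cur.getD i "") cur.length i := by
  obtain ⟨hge, _, _, hbd⟩ :=
    altRunEnd_spec cur (cur.getD i "") cur.length i (by omega) (by omega)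
  rcases Nat.eq_or_lt_of_le hge with he | hlt
  · exfalso
    rw [← he] at hbd
    exact hbd h rfl
  · exact hlt

-- A's pass consumes a maximal run of k copies of x exactly as B's pass emits it:
-- k/3 primed copies followed by k%3 plain copies, restart flag set iff k ≥ 3.
theorem goA_run (tmp : List String) (x : String) : ∀ k i newLst restart f,
    1 ≤ k → i + k ≤ tmp.length → tmp.length ≤ i + f →
    (∀ m, i ≤ m → m < i + k → tmp.getD m "" = x) →
    (i + k < tmp.length → tmp.getD (i + k) "" ≠ x) →
    goA tmp f i newLst restart =
      goA tmp tmp.length (i + k)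
        (newLst ++ List.replicate (k / 3) (x ++ "'") ++ List.replicate (k % 3) x)
        (restart || decide (3 ≤ k)) := by
  intro k
  induction k using Nat.strong_induction_on with
  | _ k ih =>
    intro i newLst restart f hk hkl hf hrun hbd
    have hx : tmp.getD i "" = x := hrun i (Nat.le_refl _) (by omega)
    have hi : i < tmp.length := by omega
    obtain ⟨f0, rfl⟩ : ∃ f0, f = f0 + 1 := ⟨f - 1, by omega⟩
    by_cases h3 : 3 ≤ k
    · -- the collapse branch fires
      have h1 : tmp.getD (i+1) "" = x := hrun (i+1) (by omega) (by omega)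
      have h2 : tmp.getD (i+2) "" = x := hrun (i+2) (by omega) (by omega)
      rw [goA_succ, if_pos hi, if_pos ⟨by omega, by rw [hx, h1], by rw [h1, h2]⟩, hx]
      rcases Nat.eq_or_lt_of_le h3 with rfl | h4
      · -- k = 3 : the run is consumed by a single collapse
        rw [goA_fuel_any tmp f0 tmp.length (i+3) _ _ (by omega) (by omega)]
        simp
      · have := ih (k - 3) (by omega) (i + 3) (newLst ++ [x ++ "'"]) true f0
          (by omega) (by omega) (by omega)
          (fun m hm1 hm2 => hrun m (by omega) (by omega))
          (by intro hlt
              have he : i + 3 + (k - 3) = i + k := by omega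
              rw [he] at hlt ⊢
              exact hbd hlt)
        have he : i + 3 + (k - 3) = i + k := by omega
        rw [he] at this
        rw [this]
        congr 1
        · have hd : k / 3 = ((k - 3) / 3) + 1 := by omega
          have hm : (k - 3) % 3 = k % 3 := by omega
          rw [hm, hd, List.replicate_succ]
          simp [List.append_assoc]
        · simp [h3]
    · interval_cases k
      · -- k = 1
        rw [goA_succ, if_pos hi, if_neg ?_]
        · rw [hx, goA_fuel_any tmp f0 tmp.length (i+1) _ _ (by omega) (by omega)]
          simp
        · rintro ⟨hle, he1, he2⟩
          have hne : tmp.getD (i+1) "" ≠ x := hbd (by omega)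
          rw [hx] at he1; exact hne he1.symm
      · -- k = 2
        have h1 : tmp.getD (i+1) "" = x := hrun (i+1) (by omega) (by omega)
        obtain ⟨f1, rfl⟩ : ∃ f1, f0 = f1 + 1 := ⟨f0 - 1, by omega⟩
        rw [goA_succ, if_pos hi, if_neg ?_]
        · rw [goA_succ, if_pos (show i + 1 < tmp.length by omega), if_neg ?_]
          · have he : i + 1 + 1 = i + 2 := by omega
            rw [he, hx, h1,
              goA_fuel_any tmp f1 tmp.length (i+2) _ _ (by omega) (by omega)]
            simp [List.replicate_succ]
          · rintro ⟨hle, he1, he2⟩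
            have he12 : i + 1 + 1 = i + 2 := by omega
            rw [he12, h1] at he1
            exact hbd (by omega) he1.symm
        · rintro ⟨hle, he1, he2⟩
          have hne : tmp.getD (i+2) "" ≠ x := hbd (by omega)
          rw [h1] at he2; exact hne he2.symm

-- the two passes agree step for step, one maximal run at a time
theorem pass_eq (tmp : List String) : ∀ fp i newLst restart fg,
    tmp.length ≤ i + fp → tmp.length ≤ i + fg →
    goA tmp fg i newLst restart = altPass tmp fp i newLst restart := by
  intro fp
  induction fp with
  | zero =>
      intro i newLst restart fg hp hg
      rw [goA_exit _ _ _ _ _ (by omega), altPass_exit _ _ _ _ _ (by omega)]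
  | succ fp ih =>
      intro i newLst restart fg hp hg
      by_cases hi : i < tmp.length
      · rw [altPass_succ, if_pos hi]
        obtain ⟨hge, hle, hrun, hbd⟩ :=
          altRunEnd_spec tmp (tmp.getD i "") tmp.length i (by omega) (by omega)
        have hgt := altRunEnd_gt tmp i hi
        have he : i + (altRunEnd tmp (tmp.getD i "") tmp.length i - i) =
            altRunEnd tmp (tmp.getD i "") tmp.length i := by omega
        have hk := goA_run tmp (tmp.getD i "")
          (altRunEnd tmp (tmp.getD i "") tmp.length i - i) i newLst restart fg
          (by omega) (by omega) hg
          (fun m hm1 hm2 => hrun m hm1 (by omega))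
          (by rw [he]; exact hbd)
        rw [he] at hk
        have hflag : decide (3 ≤ altRunEnd tmp (tmp.getD i "") tmp.length i - i) =
            decide ((altRunEnd tmp (tmp.getD i "") tmp.length i - i) / 3 ≠ 0) :=
          decide_eq_decide.mpr (by omega)
        rw [hk, hflag]
        exact ih (altRunEnd tmp (tmp.getD i "") tmp.length i) _ _ tmp.length
          (by omega) (by omega)
      · rw [goA_exit _ _ _ _ _ (by omega), altPass_exit _ _ _ _ _ (by omega)]

theorem drive_eq : ∀ fuel (tmp : List String), tmp.length < fuel →
    driveA fuel tmp = driveB fuel tmp := by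
  intro fuel
  induction fuel with
  | zero => intro tmp h; omega
  | succ f ih =>
      intro tmp h
      have hpass : goA tmp tmp.length 0 [] false = altPass tmp tmp.length 0 [] false :=
        pass_eq tmp tmp.length 0 [] false tmp.length (by omega) (by omega)
      rw [driveA_succ, driveB_succ, ← hpass]
      split
      case isTrue h2 =>
        have hlen := goA_restart tmp h2
        exact ih (goA tmp tmp.length 0 [] false).1 (by omega)
      case isFalse h2 => rfl

theorem py_eq_alt (tmp : List String) :
    removeThreeMovement_py tmp = removeThreeMovement_py_alt tmp :=
  drive_eq (tmp.length + 1) tmp (by omega)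

-- ===== VERDICT (by name: the statement is the Claim_ definition above) =====
theorem removeThreeMovement_py_spec : Claim_equal_removeThreeMovement_py := by
  unfold Claim_equal_removeThreeMovement_py Spec_removeThreeMovement_py
  intro tmp _
  exact py_eq_alt tmp
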